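-- pv_equiv track=rewrite | github.com/frigonj/agent-stack | core/context.py | truncate_memory_entries
-- ===== SOURCE A (Python) =====
-- BUDGET: dict[str, int] = {
--     "task":          4_000,   # incoming task description from Discord / think loop
--     "file":          8_000,   # file content read by executor or document_qa
--     "code":         10_000,   # code search snippets
--     "memory_entry":    600,   # single recalled memory entry content
--     "memory_total":  3_000,   # all recall results combined
--     "result":        3_000,   # specialist result relayed back to orchestrator
--     "payload":       2_000,   # event payload stored in Redis streams
--     "command_out":   3_000,   # shell command stdout / stderr
--     "context":       4_000,   # assembled prior-knowledge context block
-- }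
--
-- def truncate(text: str, max_chars: int, label: str = "content") -> str:
--     """
--     Truncate *text* to *max_chars*, appending a concise notice if truncated.
--     The notice is intentionally short so it doesn't eat into the budget.
--     """
--     if not text or len(text) <= max_chars:
--         return text
--     removed = len(text) - max_chars
--     return text[:max_chars] + f"\n[…{removed:,} chars omitted from {label}]"
--
-- def truncate_memory_entries(entries: list[dict]) -> list[dict]:
--     """
--     Truncate each memory entry's content field and stop accumulating once the
--     combined length exceeds BUDGET["memory_total"].
--     Returns a (possibly shorter) list of entries safe to include in an LLM prompt.
--     """
--     out: list[dict] = []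
--     total = 0
--     for e in entries:
--         content = truncate(
--             e.get("content", ""),
--             BUDGET["memory_entry"],
--             f"memory:{e.get('topic', '')}",
--         )
--         total += len(content)
--         if total > BUDGET["memory_total"]:
--             break
--         out.append({**e, "content": content})
--     return out
-- ===== SOURCE B (Python) =====
-- BUDGET: dict[str, int] = {
--     "task":          4_000,
--     "file":          8_000,
--     "code":         10_000,
--     "memory_entry":    600,
--     "memory_total":  3_000,
--     "result":        3_000,
--     "payload":       2_000,
--     "command_out":   3_000,
--     "context":       4_000,
-- }
--
-- def _clip(e: dict) -> str:
--     """Truncated content string for one entry (same notice format as truncate())."""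
--     text = e.get("content", "")
--     limit = BUDGET["memory_entry"]
--     if len(text) > limit and text:
--         return "%s\n[…%s chars omitted from memory:%s]" % (
--             text[:limit], format(len(text) - limit, ","), e.get("topic", ""))
--     return text
--
-- def _fit(lens: list, budget: int) -> int:
--     """How many leading lengths fit in the budget (stop at the first overflow)."""
--     kept = 0
--     for n in lens:
--         if budget < n:
--             break
--         budget -= n
--         kept += 1
--     return kept
--
-- def truncate_memory_entries(entries: list[dict]) -> list[dict]:
--     contents = [_clip(e) for e in entries]
--     cut = _fit([len(c) for c in contents], BUDGET["memory_total"])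
--     return [e | {"content": c} for e, c in zip(entries, contents)][:cut]
-- ===== Notes on version B (the rewrite author's own statement) =====
-- stated objective: alternative
-- what changed: Replaces A's fused accumulate-and-break loop by a staged decomposition: map each entry to its truncated content, count with a budget countdown how many leading content lengths fit, then build all merged entries and slice that prefix; lookups and the dict merge are done by direct first-match scans instead of dict construction.
import Mathlib
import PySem

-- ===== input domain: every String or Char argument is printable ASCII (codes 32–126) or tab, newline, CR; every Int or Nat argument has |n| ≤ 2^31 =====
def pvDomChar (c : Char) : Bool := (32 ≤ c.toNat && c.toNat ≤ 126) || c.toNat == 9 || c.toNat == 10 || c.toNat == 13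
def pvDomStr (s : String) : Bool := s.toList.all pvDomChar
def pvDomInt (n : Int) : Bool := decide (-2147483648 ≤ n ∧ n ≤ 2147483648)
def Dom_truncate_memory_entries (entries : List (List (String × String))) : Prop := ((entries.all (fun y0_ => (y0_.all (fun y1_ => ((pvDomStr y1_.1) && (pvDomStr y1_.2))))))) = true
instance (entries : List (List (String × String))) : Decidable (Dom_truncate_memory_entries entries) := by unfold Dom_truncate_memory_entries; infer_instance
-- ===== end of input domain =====

-- B replaces A's fused accumulate-and-break loop by a staged decomposition: map every entry
-- to its truncated content, count with a budget COUNTDOWN how many leading lengths fit,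
-- then build all merged entries and slice off that prefix (objective: alternative, same cost).

-- ===== PORT A =====
-- f"{removed:,}" (removed is always positive here): ',' every 3 digits from the right
def pvCommaGroupRev : List Char → List Char
  | a :: b :: c :: d :: rest => a :: b :: c :: ',' :: pvCommaGroupRev (d :: rest)
  | ds => ds

-- module helper `truncate(text, max_chars, label)` as A's loop calls it
def pvTruncate (text : String) (maxChars : Int) (label : String) : String :=
  let cs := text.toList
  if cs = [] ∨ (cs.length : Int) ≤ maxChars then text
  else
    let removed : Int := (cs.length : Int) - maxChars
    String.ofList (PySem.List.slice cs none (some maxChars) ++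
      ("\n[…".toList ++ (pvCommaGroupRev (PySem.Int.toChars removed).reverse).reverse ++
       " chars omitted from ".toList ++ label.toList ++ "]".toList))

-- content = truncate(e.get("content",""), 600, f"memory:{e.get('topic','')}")
def pvEntryContent (e : List (String × String)) : String :=
  pvTruncate (PySem.Dict.getD (PySem.Dict.ofList e) "content" "") 600
    (String.ofList ("memory:".toList ++ (PySem.Dict.getD (PySem.Dict.ofList e) "topic" "").toList))

-- {**e, "content": content}
def pvWithContent (e : List (String × String)) (c : String) : List (String × String) :=
  ((PySem.Dict.ofList e).insert "content" c).items

-- A's loop: accumulate total, break once it exceeds BUDGET["memory_total"] = 3000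
def pvGoA : List (List (String × String)) → Int → List (List (String × String))
  | [], _ => []
  | e :: rest, total =>
    let content := pvEntryContent e
    let total' := total + PySem.Str.len content
    if 3000 < total' then []
    else pvWithContent e content :: pvGoA rest total'

def truncate_memory_entries (entries : List (List (String × String))) : List (List (String × String)) :=
  pvGoA entries 0

-- ===== PORT B =====
-- e.get(k, d): first (= only, under Pre_) matching value in the association list
def pvLookupD (e : List (String × String)) (k d : String) : String :=
  match e.find? (fun kv => kv.1 == k) with
  | some kv => kv.2
  | none => d

-- _clip(e): truncated content with the notice built by the %-format template
-- (format(n, ",") ported like A's f"{n:,}" via the shared pvCommaGroupRev)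
def pvClip (e : List (String × String)) : String :=
  let text := pvLookupD e "content" ""
  if 600 < PySem.Str.len text ∧ text ≠ "" then
    String.ofList (text.toList.take 600 ++
      '\n' :: '[' :: '…' ::
      ((pvCommaGroupRev (PySem.Int.toChars (PySem.Str.len text - 600)).reverse).reverse ++
       (" chars omitted from memory:".toList ++ (pvLookupD e "topic" "").toList ++ [']'])))
  else text

-- _fit(lens, budget): budget countdown, stop at the first overflow
def pvFit : List Int → Int → Nat
  | [], _ => 0
  | n :: rest, budget => if budget < n then 0 else pvFit rest (budget - n) + 1

-- e | {"content": c}: overwrite in place, append if absent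
def pvMergeContent (c : String) : List (String × String) → List (String × String)
  | [] => [("content", c)]
  | kv :: rest => if kv.1 == "content" then ("content", c) :: rest else kv :: pvMergeContent c rest

def truncate_memory_entries_alt (entries : List (List (String × String))) : List (List (String × String)) :=
  let contents := entries.map pvClip
  let cut := pvFit (contents.map PySem.Str.len) 3000
  (((entries.zip contents).map (fun ec => pvMergeContent ec.2 ec.1)).take cut)

-- ===== PRECONDITION & SPEC =====
-- Pre_ excludes association lists carrying a duplicate key inside one entry: such a list is
-- an artifact of the dict-as-assoc-list encoding and corresponds to no Python dict input,
-- so neither Python ever receives it (A's Python raises no exception anywhere).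
def Pre_truncate_memory_entries (entries : List (List (String × String))) : Prop :=
  ∀ e ∈ entries, (e.map Prod.fst).Nodup
instance (entries : List (List (String × String))) : Decidable (Pre_truncate_memory_entries entries) := by unfold Pre_truncate_memory_entries; infer_instance

def pvWitness_truncate_memory_entries : (List (List (String × String))) :=
  [[("content", "hello"), ("topic", "t")], [("topic", "u")]]

def Spec_truncate_memory_entries (entries : List (List (String × String))) (out : List (List (String × String))) : Prop := out = truncate_memory_entries_alt entries
instance (entries : List (List (String × String))) (out : List (List (String × String))) : Decidable (Spec_truncate_memory_entries entries out) := by unfold Spec_truncate_memory_entries; infer_instance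

-- ===== CLAIM (what is proved, stated in full; the proofs are below) =====
def Claim_equal_truncate_memory_entries : Prop := ∀ (entries : List (List (String × String))), Dom_truncate_memory_entries entries → Pre_truncate_memory_entries entries → Spec_truncate_memory_entries entries (truncate_memory_entries entries)

-- ===== LEMMAS AND PROOFS =====

-- under Pre_ the assoc list IS the dict's items list
theorem pv_items_ofList (e : List (String × String)) (h : (e.map Prod.fst).Nodup) :
    (PySem.Dict.ofList e).items = e := by
  have := PySem.Dict.items_foldl_insert_fresh (l := e) (k := Prod.fst) (v := Prod.snd)
    (d := (PySem.Dict.empty : PySem.Dict String String)) (by intro a _; simp [pysem]) h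
  simpa [PySem.Dict.ofList, PySem.Dict.update, PySem.Dict.empty] using this

-- dict lookup on a Nodup-keyed assoc list is first-match lookup
theorem pv_getD_eq_lookup (e : List (String × String)) (h : (e.map Prod.fst).Nodup)
    (k d : String) : PySem.Dict.getD (PySem.Dict.ofList e) k d = pvLookupD e k d := by
  simp only [PySem.Dict.getD, PySem.Dict.get?, pv_items_ofList e h, pvLookupD]
  cases e.find? (fun kv => kv.1 == k) <;> rfl

-- the two content builders agree under Pre_
theorem pv_content_eq (e : List (String × String)) (h : (e.map Prod.fst).Nodup) :
    pvEntryContent e = pvClip e := by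
  simp only [pvEntryContent, pvClip, pvTruncate, pv_getD_eq_lookup e h]
  set text := pvLookupD e "content" "" with htext
  by_cases hc : text.toList = [] ∨ (text.toList.length : Int) ≤ 600
  · rw [if_pos hc, if_neg]
    rintro ⟨h600, hne⟩
    rw [PySem.Str.len_eq] at h600
    have hne' : text.toList ≠ [] := by simpa [pysem] using hne
    rcases hc with hc | hc
    · exact hne' hc
    · omega
  · push Not at hc
    rw [if_neg (by push Not; exact hc),
      if_pos ⟨by rw [PySem.Str.len_eq]; exact hc.2, by simpa [pysem] using hc.1⟩]
    congr 1
    rw [PySem.List.slice_to _ (by norm_num : (0:Int) ≤ 600), PySem.Str.len_eq]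
    simp [List.append_assoc]

-- Dict.insert's replace-or-append, on a Nodup-keyed list, is first-match replacement
theorem pv_replace_eq (c : String) (e : List (String × String)) (h : (e.map Prod.fst).Nodup) :
    (if e.any (fun p => p.1 == "content") then
        e.map (fun p => if p.1 == "content" then ("content", c) else p)
      else e ++ [("content", c)]) = pvMergeContent c e := by
  induction e with
  | nil => simp [pvMergeContent]
  | cons kv rest ih =>
    simp only [List.map_cons, List.nodup_cons, List.mem_map] at h
    by_cases hk : kv.1 = "content"
    · have hrest : ∀ p ∈ rest, (if p.1 == "content" then (("content" : String), c) else p) = p := by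
        intro p hp
        rw [if_neg]
        simp only [beq_iff_eq]
        intro hpc
        exact h.1 ⟨p, hp, by rw [hpc, hk]⟩
      have hmap : rest.map (fun p => if p.1 == "content" then (("content" : String), c) else p)
          = rest := by
        rw [List.map_congr_left (g := id) hrest, List.map_id]
      rw [if_pos (by simp [hk]), List.map_cons, if_pos (by simp [hk]), hmap,
        pvMergeContent, if_pos (by simp [hk])]
    · have hne : (kv.1 == "content") = false := by simp [hk]
      have hany : ((kv :: rest).any fun p => p.1 == "content") = (rest.any fun p => p.1 == "content") := by
        simp [List.any_cons, hne]
      rw [hany]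
      simp only [pvMergeContent, hne, Bool.false_eq_true, if_false]
      rw [← ih h.2]
      by_cases hr : (rest.any fun p => p.1 == "content") = true
      · simp only [hr, if_true, List.map_cons, hne, Bool.false_eq_true, if_false]
      · simp only [Bool.not_eq_true] at hr
        simp only [hr, Bool.false_eq_true, if_false, List.cons_append]

-- the two dict-merge builders agree under Pre_
theorem pv_merge_eq (e : List (String × String)) (h : (e.map Prod.fst).Nodup) (c : String) :
    pvWithContent e c = pvMergeContent c e := by
  rw [pvWithContent, PySem.Dict.items_insert]
  simp only [PySem.Dict.contains, pv_items_ofList e h]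
  exact pv_replace_eq c e h

-- A's fused loop is B's build-then-slice, for any starting total
theorem pvGoA_eq (es : List (List (String × String))) :
    ∀ total : Int, (∀ e ∈ es, (e.map Prod.fst).Nodup) →
    pvGoA es total =
      ((es.zip (es.map pvClip)).map (fun ec => pvMergeContent ec.2 ec.1)).take
        (pvFit ((es.map pvClip).map PySem.Str.len) (3000 - total)) := by
  induction es with
  | nil => intro t _; rfl
  | cons e rest ih =>
    intro t hnd
    have he := hnd e (List.mem_cons_self ..)
    simp only [pvGoA, List.map_cons, List.zip_cons_cons, pvFit, pv_content_eq e he]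
    split_ifs with h1 h2 h2
    · rfl
    · exfalso; omega
    · exfalso; omega
    · simp only [List.take_succ_cons, pv_merge_eq e he]
      rw [ih (t + PySem.Str.len (pvClip e)) (fun x hx => hnd x (List.mem_cons_of_mem _ hx)),
        show 3000 - (t + PySem.Str.len (pvClip e)) = 3000 - t - PySem.Str.len (pvClip e) by ring]

-- ===== VERDICT (by name: the statement is the Claim_ definition above) =====
theorem truncate_memory_entries_spec : Claim_equal_truncate_memory_entries := by
  intro entries _ hpre
  show truncate_memory_entries entries = truncate_memory_entries_alt entries
  simpa [truncate_memory_entries, truncate_memory_entries_alt] using pvGoA_eq entries 0 hpre
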